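-- pv_equiv track=rewrite | github.com/PageBot/PageBot | Lib/pagebot/fonttoolbox/unicodes/unicoderanges.py | packRangeBits
-- ===== SOURCE A (Python) =====
-- def packRangeBits(bitSet):
--     """Given a set of bit numbers, return the corresponding ulUnicodeRange1,
--     ulUnicodeRange2, ulUnicodeRange3 and ulUnicodeRange4 for the OS/2 table.
--
--         >>> packRangeBits(set([0]))
--         (1, 0, 0, 0)
--         >>> packRangeBits(set([32]))
--         (0, 1, 0, 0)
--         >>> packRangeBits(set([96]))
--         (0, 0, 0, 1)
--         >>> packRangeBits(set([0, 1, 2, 3, 4, 5, 6, 7, 8, 9, 10, 11, 12, 13, 14, 15, 16, 17, 18, 19, 20, 21, 22, 23, 24, 25, 26, 27, 28, 29, 30, 31, 32, 65, 98]))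
--         (4294967295, 1, 2, 4)
--         >>> packRangeBits(set(range(128)))
--         (4294967295, 4294967295, 4294967295, 4294967295)
--         >>> 0xffffffff
--         4294967295
--     """
--     bitNum = 0
--     bitFields = []
--     for i in range(4):
--         bitField = 0
--         for localBitNum in range(32):
--             if bitNum in bitSet:
--                 mask = 1 << localBitNum
--                 bitField |= mask
--             bitNum += 1
--         bitFields.append(bitField)
--     assert bitNum == 128
--     ur1, ur2, ur3, ur4 = bitFields
--     return ur1, ur2, ur3, ur4
-- ===== SOURCE B (Python) =====
-- def packRangeBits(bitSet):
--     ur = [0, 0, 0, 0]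
--     for b in bitSet:
--         if 0 <= b < 128:
--             ur[b // 32] |= 1 << (b % 32)
--     return tuple(ur)
-- ===== Notes on version B (the rewrite author's own statement) =====
-- stated objective: simpler
-- what changed: Instead of scanning all 128 bit positions with a membership test per position, B loops once over the elements of bitSet and ORs each in-range bit directly into the proper 32-bit field.
import Mathlib
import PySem

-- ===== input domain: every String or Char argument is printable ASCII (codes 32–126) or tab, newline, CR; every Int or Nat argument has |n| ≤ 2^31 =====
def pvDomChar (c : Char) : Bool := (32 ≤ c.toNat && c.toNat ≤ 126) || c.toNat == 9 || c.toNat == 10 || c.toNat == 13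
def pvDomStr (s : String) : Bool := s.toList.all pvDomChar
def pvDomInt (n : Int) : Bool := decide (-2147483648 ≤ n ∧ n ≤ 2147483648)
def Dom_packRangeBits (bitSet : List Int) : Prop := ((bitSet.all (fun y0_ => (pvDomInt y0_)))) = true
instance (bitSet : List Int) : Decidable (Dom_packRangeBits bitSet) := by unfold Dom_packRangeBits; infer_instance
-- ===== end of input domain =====

-- B replaces A's scan of all 128 bit positions (membership test per position) by a single
-- pass over the elements of bitSet, OR-ing each in-range bit into its field (objective: simpler).

-- ===== PORT A =====
-- literal port: outer loop over range(4), inner over range(32), threading (bitNum, bitFields);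
-- '1 << localBitNum' with localBitNum ∈ [0,32) is '(1:Int) <<< localBitNum.toNat' (exact, nonneg shift)
def packRangeBits (bitSet : List Int) : Int × Int × Int × Int :=
  let st := (PySem.List.pyRange 0 4 1).foldl
    (fun (st : Int × List Int) _i =>
      let inner := (PySem.List.pyRange 0 32 1).foldl
        (fun (p : Int × Int) localBitNum =>
          let bitField :=
            if bitSet.contains p.1 then
              PySem.Int.bor p.2 ((1 : Int) <<< localBitNum.toNat)
            else p.2
          (p.1 + 1, bitField))
        (st.1, 0)
      (inner.1, st.2 ++ [inner.2]))
    (0, ([] : List Int))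
  match st.2 with
  | [a, b, c, d] => (a, b, c, d)
  | _ => (0, 0, 0, 0)  -- unreachable: bitFields always has 4 elements

-- ===== PORT B =====
def packRangeBits_alt (bitSet : List Int) : Int × Int × Int × Int :=
  let ur := bitSet.foldl
    (fun (ur : List Int) b =>
      if 0 ≤ b ∧ b < 128 then
        ur.modify (PySem.Int.floordiv b 32).toNat
          (fun f => PySem.Int.bor f ((1 : Int) <<< (PySem.Int.mod b 32).toNat))
      else ur)
    [0, 0, 0, 0]
  -- tuple(ur): ur always has exactly 4 elements
  (ur.getD 0 0, ur.getD 1 0, ur.getD 2 0, ur.getD 3 0)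

-- ===== PRECONDITION & SPEC =====
def Spec_packRangeBits (bitSet : List Int) (out : Int × Int × Int × Int) : Prop := out = packRangeBits_alt bitSet
instance (bitSet : List Int) (out : Int × Int × Int × Int) : Decidable (Spec_packRangeBits bitSet out) := by unfold Spec_packRangeBits; infer_instance

-- ===== CLAIM (what is proved, stated in full; the proofs are below) =====
def Claim_equal_packRangeBits : Prop := ∀ (bitSet : List Int), Dom_packRangeBits bitSet → Spec_packRangeBits bitSet (packRangeBits bitSet)


-- ===== LEMMAS AND PROOFS =====

-- A-side mask builder in Int: positions j < n, bit j set iff (s+j) is in bs, starting from acc a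
def pvFieldI (bs : List Int) (s : Int) (n : Nat) (a : Int) : Int :=
  (List.range n).foldl (fun acc (j : Nat) => if bs.contains (s + (j : Int)) then PySem.Int.bor acc ((1 : Int) <<< j) else acc) a

-- same builder over Nat
def pvFieldN (bs : List Int) (s : Int) (n : Nat) (a : Nat) : Nat :=
  (List.range n).foldl (fun acc (j : Nat) => if bs.contains (s + (j : Int)) then acc ||| ((1 : Nat) <<< j) else acc) a

-- B-side mask builder in Int: bit (b % 32) set for every b of bs falling in field k
def pvMaskI (bs : List Int) (k : Nat) (a : Int) : Int :=
  bs.foldl (fun acc b =>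
    if 0 ≤ b ∧ b < 128 ∧ PySem.Int.floordiv b 32 = (k : Int) then
      PySem.Int.bor acc ((1 : Int) <<< (PySem.Int.mod b 32).toNat)
    else acc) a

-- same builder over Nat
def pvMaskN (bs : List Int) (k : Nat) (a : Nat) : Nat :=
  bs.foldl (fun acc b =>
    if 0 ≤ b ∧ b < 128 ∧ PySem.Int.floordiv b 32 = (k : Int) then
      acc ||| ((1 : Nat) <<< (PySem.Int.mod b 32).toNat)
    else acc) a

theorem pv_shift_cast (j : Nat) : ((1 : Int) <<< j) = ((1 <<< j : Nat) : Int) := by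
  simp [Int.shiftLeft_eq, Nat.shiftLeft_eq]

theorem pvFieldI_succ (bs : List Int) (s : Int) (m : Nat) (a : Int) :
    pvFieldI bs s (m + 1) a
    = (if bs.contains (s + (m : Int)) then PySem.Int.bor (pvFieldI bs s m a) ((1 : Int) <<< m) else pvFieldI bs s m a) := by
  rw [pvFieldI, List.range_succ, List.foldl_append]
  simp only [List.foldl_cons, List.foldl_nil]
  rfl

theorem pvFieldN_succ (bs : List Int) (s : Int) (m : Nat) (a : Nat) :
    pvFieldN bs s (m + 1) a
    = (if bs.contains (s + (m : Int)) then (pvFieldN bs s m a) ||| ((1 : Nat) <<< m) else pvFieldN bs s m a) := by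
  rw [pvFieldN, List.range_succ, List.foldl_append]
  simp only [List.foldl_cons, List.foldl_nil]
  rfl

theorem pvMaskI_cons (bs : List Int) (b : Int) (k : Nat) (a : Int) :
    pvMaskI (b :: bs) k a
    = pvMaskI bs k (if 0 ≤ b ∧ b < 128 ∧ PySem.Int.floordiv b 32 = (k : Int) then
        PySem.Int.bor a ((1 : Int) <<< (PySem.Int.mod b 32).toNat) else a) := by
  rfl

theorem pvMaskN_cons (bs : List Int) (b : Int) (k : Nat) (a : Nat) :
    pvMaskN (b :: bs) k a
    = pvMaskN bs k (if 0 ≤ b ∧ b < 128 ∧ PySem.Int.floordiv b 32 = (k : Int) then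
        a ||| ((1 : Nat) <<< (PySem.Int.mod b 32).toNat) else a) := by
  rfl

theorem pv_modify4_0 (g : Int → Int) (x0 x1 x2 x3 : Int) : [x0, x1, x2, x3].modify 0 g = [g x0, x1, x2, x3] := rfl
theorem pv_modify4_1 (g : Int → Int) (x0 x1 x2 x3 : Int) : [x0, x1, x2, x3].modify 1 g = [x0, g x1, x2, x3] := rfl
theorem pv_modify4_2 (g : Int → Int) (x0 x1 x2 x3 : Int) : [x0, x1, x2, x3].modify 2 g = [x0, x1, g x2, x3] := rfl
theorem pv_modify4_3 (g : Int → Int) (x0 x1 x2 x3 : Int) : [x0, x1, x2, x3].modify 3 g = [x0, x1, x2, g x3] := rfl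

-- A's inner loop decouples into bitNum counting and the mask fold
theorem pv_innerA (bs : List Int) (n : Nat) (s a : Int) :
    ((List.range n).map (fun (j : Nat) => (Int.ofNat j))).foldl
      (fun (p : Int × Int) localBitNum =>
        (p.1 + 1, if bs.contains p.1 then PySem.Int.bor p.2 ((1 : Int) <<< localBitNum.toNat) else p.2))
      (s, a)
    = (s + n, pvFieldI bs s n a) := by
  induction n with
  | zero => simp [pvFieldI]
  | succ m ih =>
    rw [List.range_succ, List.map_append, List.foldl_append, ih, pvFieldI_succ]
    simp only [List.map_cons, List.map_nil, List.foldl_cons, List.foldl_nil, Int.toNat_natCast, Int.ofNat_eq_natCast, Int.shiftLeft_natCast_right]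
    refine Prod.ext ?_ rfl
    push_cast; ring

theorem pv_A_eq (bs : List Int) :
    packRangeBits bs = (pvFieldI bs 0 32 0, pvFieldI bs 32 32 0, pvFieldI bs 64 32 0, pvFieldI bs 96 32 0) := by
  have h4 : PySem.List.pyRange 0 4 1 = [0, 1, 2, 3] := by decide
  have h32 : PySem.List.pyRange 0 32 1 = (List.range 32).map (fun (j : Nat) => (Int.ofNat j)) := by decide
  unfold packRangeBits
  rw [h4, h32]
  simp only [List.foldl_cons, List.foldl_nil]
  rw [pv_innerA, pv_innerA, pv_innerA, pv_innerA]
  norm_num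

theorem pv_altFold (bs : List Int) (u0 u1 u2 u3 : Int) :
    bs.foldl
      (fun (ur : List Int) b =>
        if 0 ≤ b ∧ b < 128 then
          ur.modify (PySem.Int.floordiv b 32).toNat
            (fun f => PySem.Int.bor f ((1 : Int) <<< (PySem.Int.mod b 32).toNat))
        else ur)
      [u0, u1, u2, u3]
    = [pvMaskI bs 0 u0, pvMaskI bs 1 u1, pvMaskI bs 2 u2, pvMaskI bs 3 u3] := by
  induction bs generalizing u0 u1 u2 u3 with
  | nil => simp [pvMaskI]
  | cons b t ih =>
    rw [List.foldl_cons, pvMaskI_cons, pvMaskI_cons, pvMaskI_cons, pvMaskI_cons]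
    by_cases hb : 0 ≤ b ∧ b < 128
    · have hd : PySem.Int.floordiv b 32 = 0 ∨ PySem.Int.floordiv b 32 = 1 ∨
          PySem.Int.floordiv b 32 = 2 ∨ PySem.Int.floordiv b 32 = 3 := by
        rw [PySem.Int.floordiv_eq_ediv_of_pos (by norm_num)]; omega
      rcases hd with h | h | h | h
      · rw [if_pos hb, h, show ((0 : Int).toNat) = 0 from rfl, pv_modify4_0, ih]
        norm_num [hb.1, hb.2]
      · rw [if_pos hb, h, show ((1 : Int).toNat) = 1 from rfl, pv_modify4_1, ih]
        norm_num [hb.1, hb.2]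
      · rw [if_pos hb, h, show ((2 : Int).toNat) = 2 from rfl, pv_modify4_2, ih]
        norm_num [hb.1, hb.2]
      · rw [if_pos hb, h, show ((3 : Int).toNat) = 3 from rfl, pv_modify4_3, ih]
        norm_num [hb.1, hb.2]
    · rw [if_neg hb]
      rw [ih]
      have hcond : ∀ k : Nat, ¬ (0 ≤ b ∧ b < 128 ∧ PySem.Int.floordiv b 32 = (k : Int)) := by
        intro k hc; exact hb ⟨hc.1, hc.2.1⟩
      simp only [if_neg (hcond 0), if_neg (hcond 1), if_neg (hcond 2), if_neg (hcond 3)]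

theorem pv_B_eq (bs : List Int) :
    packRangeBits_alt bs = (pvMaskI bs 0 0, pvMaskI bs 1 0, pvMaskI bs 2 0, pvMaskI bs 3 0) := by
  unfold packRangeBits_alt
  rw [pv_altFold]
  rfl

theorem pv_fieldI_cast (bs : List Int) (s : Int) (n : Nat) (a : Nat) :
    pvFieldI bs s n (a : Int) = ((pvFieldN bs s n a : Nat) : Int) := by
  induction n with
  | zero => simp [pvFieldI, pvFieldN]
  | succ m ih =>
    rw [pvFieldI_succ, pvFieldN_succ, ih]
    split
    · rw [pv_shift_cast, PySem.Int.bor_natCast]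
    · rfl

theorem pv_maskI_cast (bs : List Int) (k : Nat) (a : Nat) :
    pvMaskI bs k (a : Int) = ((pvMaskN bs k a : Nat) : Int) := by
  induction bs generalizing a with
  | nil => simp [pvMaskI, pvMaskN]
  | cons b t ih =>
    rw [pvMaskI_cons, pvMaskN_cons]
    split
    · rw [pv_shift_cast, PySem.Int.bor_natCast, ih]
    · exact ih a

theorem pv_fieldN_testBit (bs : List Int) (s : Int) (n : Nat) (a : Nat) (i : Nat) :
    (pvFieldN bs s n a).testBit i = (a.testBit i || (decide (i < n) && bs.contains (s + (i : Int)))) := by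
  induction n with
  | zero => simp [pvFieldN]
  | succ m ih =>
    rw [pvFieldN_succ]
    by_cases hc : s + (m : Int) ∈ bs <;>
      by_cases him : i = m <;>
      simp [hc, him, ih, Nat.one_shiftLeft, Nat.testBit_two_pow, Nat.lt_succ_iff, Nat.le_iff_lt_or_eq] <;> first | tauto | (subst him; simp [ih, hc])
theorem pv_maskN_testBit (bs : List Int) (k : Nat) (a : Nat) (i : Nat) :
    (pvMaskN bs k a).testBit i
    = (a.testBit i ||
       bs.any (fun b => decide (0 ≤ b ∧ b < 128 ∧ PySem.Int.floordiv b 32 = (k : Int) ∧ (PySem.Int.mod b 32).toNat = i))) := by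
  induction bs generalizing a with
  | nil => simp [pvMaskN]
  | cons b t ih =>
    rw [pvMaskN_cons]
    by_cases hb : 0 ≤ b ∧ b < 128 ∧ PySem.Int.floordiv b 32 = (k : Int)
    · rw [if_pos hb, ih]
      have h3 : b / 32 = (k : Int) := by
        have h := hb.2.2; rwa [PySem.Int.floordiv_eq_ediv_of_pos (by norm_num)] at h
      by_cases hi : (b % 32).toNat = i <;>
        have hi' : ((PySem.Int.mod b 32).toNat = i) ↔ ((b % 32).toNat = i) := by
          rw [PySem.Int.mod_eq_emod_of_pos (by norm_num)]
      · simp [hb.1, hb.2.1, h3, hi, hi', Nat.one_shiftLeft, Nat.testBit_two_pow, Bool.or_assoc]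
      · simp [hb.1, hb.2.1, h3, hi, hi', Nat.one_shiftLeft, Nat.testBit_two_pow]
    · rw [if_neg hb, ih]
      rw [PySem.Int.floordiv_eq_ediv_of_pos (by norm_num)] at hb
      by_cases h1 : 0 ≤ b
      · by_cases h2 : b < 128
        · have h3 : ¬ b / 32 = (k : Int) := fun h => hb ⟨h1, h2, h⟩
          simp [h3]
        · simp [h2]
      · simp [h1]

theorem pv_mask_eq_field (bs : List Int) (k : Nat) (hk : k < 4) :
    pvMaskN bs k 0 = pvFieldN bs ((32 * k : Nat) : Int) 32 0 := by
  apply Nat.eq_of_testBit_eq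
  intro i
  rw [pv_maskN_testBit, pv_fieldN_testBit]
  simp only [Nat.zero_testBit, Bool.false_or]
  rw [Bool.eq_iff_iff]
  simp only [List.any_eq_true, decide_eq_true_eq, Bool.and_eq_true, List.contains_eq_mem]
  constructor
  · rintro ⟨b, hmem, h1, h2, h3, h4⟩
    rw [PySem.Int.floordiv_eq_ediv_of_pos (by norm_num)] at h3
    rw [PySem.Int.mod_eq_emod_of_pos (by norm_num)] at h4
    have hb : b = ((32 * k : Nat) : Int) + (i : Int) := by push_cast; omega
    have hi : i < 32 := by omega
    exact ⟨by simp [hi], hb ▸ hmem⟩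
  · rintro ⟨hi, hmem⟩
    refine ⟨((32 * k : Nat) : Int) + (i : Int), hmem, by push_cast; omega, by push_cast; omega, ?_, ?_⟩
    · rw [PySem.Int.floordiv_eq_ediv_of_pos (by norm_num)]; push_cast; omega
    · rw [PySem.Int.mod_eq_emod_of_pos (by norm_num)]; push_cast; omega

-- ===== VERDICT (by name: the statement is the Claim_ definition above) =====
theorem packRangeBits_spec : Claim_equal_packRangeBits := by
  intro bs _
  unfold Spec_packRangeBits
  rw [pv_A_eq, pv_B_eq]
  have h : ∀ k : Nat, k < 4 → pvMaskI bs k 0 = pvFieldI bs ((32 * k : Nat) : Int) 32 0 := by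
    intro k hk
    have h0 : ((0 : Nat) : Int) = (0 : Int) := rfl
    rw [← h0, pv_maskI_cast, pv_fieldI_cast, pv_mask_eq_field bs k hk]
  have e0 := h 0 (by norm_num); have e1 := h 1 (by norm_num)
  have e2 := h 2 (by norm_num); have e3 := h 3 (by norm_num)
  norm_num at e0 e1 e2 e3
  rw [e0, e1, e2, e3]
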